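-- pv_equiv track=rewrite | github.com/ykghani/advent-of-code-2020 | d16/d16.py | find_matching_fields
-- ===== SOURCE A (Python) =====
-- def in_range(val: int, ranges: list) -> bool:
--     '''Checks if a value is within one of the ranges associated with a field'''
--     for a_range in ranges:
--         if a_range[0] <= val <= a_range[1]:
--             return True
--     return False
--
-- def field_matches_values(values: list, ranges: list[tuple[int, int]]) -> bool:
--     return all(in_range(val, ranges) for val in values)
--
-- def find_matching_fields(attribute_values: list, fields_dict: dict, valid_fields=None) -> list:
--     '''Returns list of matching fields for a given attribute'''
--     matching_fields = []
--     if valid_fields is None: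
--         valid_fields = list(fields_dict.keys())
--
--     for field in valid_fields:
--         if field_matches_values(attribute_values, fields_dict[field]):
--             matching_fields.append(field)
--
--     return matching_fields
-- ===== SOURCE B (Python) =====
-- def find_matching_fields(attribute_values: list, fields_dict: dict, valid_fields=None) -> list:
--     '''Returns list of matching fields for a given attribute'''
--     candidates = list(fields_dict.keys()) if valid_fields is None else list(valid_fields)
--     for val in attribute_values:
--         candidates = [f for f in candidates
--                       if any(lo <= val <= hi for lo, hi in fields_dict[f])]
--     return candidates
-- ===== Notes on version B (the rewrite author's own statement) =====
-- stated objective: alternative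
-- what changed: Inverted the loop structure: instead of testing every candidate field against all attribute values (inner all-scan per field), B scans the attribute values once, maintaining a shrinking candidate list that is filtered at each value.
import Mathlib
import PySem

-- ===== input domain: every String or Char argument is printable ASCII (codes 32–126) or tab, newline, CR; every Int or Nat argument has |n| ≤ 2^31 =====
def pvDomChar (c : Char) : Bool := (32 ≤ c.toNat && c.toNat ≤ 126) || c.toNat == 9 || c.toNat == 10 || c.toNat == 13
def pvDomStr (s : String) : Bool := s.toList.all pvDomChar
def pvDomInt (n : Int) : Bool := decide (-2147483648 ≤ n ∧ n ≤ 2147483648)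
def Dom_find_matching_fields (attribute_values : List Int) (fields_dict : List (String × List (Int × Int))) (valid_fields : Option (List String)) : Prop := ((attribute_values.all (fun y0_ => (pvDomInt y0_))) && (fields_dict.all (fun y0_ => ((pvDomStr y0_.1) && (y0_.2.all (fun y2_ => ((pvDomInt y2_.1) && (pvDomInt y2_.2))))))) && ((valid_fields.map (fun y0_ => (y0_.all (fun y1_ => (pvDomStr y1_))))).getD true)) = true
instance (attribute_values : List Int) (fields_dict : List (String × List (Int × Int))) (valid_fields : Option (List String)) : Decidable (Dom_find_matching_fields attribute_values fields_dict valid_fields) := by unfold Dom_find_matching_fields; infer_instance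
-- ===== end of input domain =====

-- ===== PORT A =====
-- in_range: loop with early return on first containing range
def in_range (val : Int) (ranges : List (Int × Int)) : Bool :=
  ranges.any (fun r => decide (r.1 ≤ val) && decide (val ≤ r.2))

def field_matches_values (values : List Int) (ranges : List (Int × Int)) : Bool :=
  values.all (fun v => in_range v ranges)

-- B differs only in loop structure; header: A=B on Pre_ (fields looked up must be keys; otherwise Python raises KeyError)
def find_matching_fields (attribute_values : List Int) (fields_dict : List (String × List (Int × Int))) (valid_fields : Option (List String)) : List String :=
  let vf := match valid_fields with
    | none => (PySem.Dict.mk fields_dict).keys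
    | some l => l
  vf.foldl (fun matching_fields field =>
      if field_matches_values attribute_values ((PySem.Dict.mk fields_dict).getD field []) then
        matching_fields ++ [field]
      else matching_fields) []

-- ===== PORT B =====
def find_matching_fields_alt (attribute_values : List Int) (fields_dict : List (String × List (Int × Int))) (valid_fields : Option (List String)) : List String :=
  let candidates := match valid_fields with
    | none => (PySem.Dict.mk fields_dict).keys
    | some l => l
  attribute_values.foldl (fun cs val =>
      cs.filter (fun f =>
        ((PySem.Dict.mk fields_dict).getD f []).any
          (fun r => decide (r.1 ≤ val) && decide (val ≤ r.2)))) candidates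

-- ===== PRECONDITION & SPEC =====
-- Pre_ excludes inputs on which Python A raises KeyError: when valid_fields is given, every listed field must be a key of fields_dict.
def Pre_find_matching_fields (attribute_values : List Int) (fields_dict : List (String × List (Int × Int))) (valid_fields : Option (List String)) : Prop :=
  (valid_fields.getD []).all (fun f => fields_dict.any (fun p => p.1 == f)) = true
instance (attribute_values : List Int) (fields_dict : List (String × List (Int × Int))) (valid_fields : Option (List String)) : Decidable (Pre_find_matching_fields attribute_values fields_dict valid_fields) := by unfold Pre_find_matching_fields; infer_instance
def pvWitness_find_matching_fields : List Int × (List (String × List (Int × Int))) × Option (List String) := ([1, 5], [("row", [(0, 3), (5, 7)]), ("seat", [(10, 20)])], some ["row", "seat"])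

def Spec_find_matching_fields (attribute_values : List Int) (fields_dict : List (String × List (Int × Int))) (valid_fields : Option (List String)) (out : List String) : Prop := out = find_matching_fields_alt attribute_values fields_dict valid_fields
instance (attribute_values : List Int) (fields_dict : List (String × List (Int × Int))) (valid_fields : Option (List String)) (out : List String) : Decidable (Spec_find_matching_fields attribute_values fields_dict valid_fields out) := by unfold Spec_find_matching_fields; infer_instance

-- ===== CLAIM (what is proved, stated in full; the proofs are below) =====
def Claim_equal_find_matching_fields : Prop := ∀ (attribute_values : List Int) (fields_dict : List (String × List (Int × Int))) (valid_fields : Option (List String)), Dom_find_matching_fields attribute_values fields_dict valid_fields → Pre_find_matching_fields attribute_values fields_dict valid_fields → Spec_find_matching_fields attribute_values fields_dict valid_fields (find_matching_fields attribute_values fields_dict valid_fields)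

-- ===== LEMMAS AND PROOFS =====

-- B's repeated-filter loop over the values computes, for any starting candidate list,
-- the filter by "all values pass".
theorem foldl_filter_eq_filter_all (p : Int → String → Bool) (vs : List Int) (cs : List String) :
    vs.foldl (fun cs v => cs.filter (p v)) cs
      = cs.filter (fun f => vs.all (fun v => p v f)) := by
  induction vs generalizing cs with
  | nil => simp
  | cons v vs ih =>
      simp only [List.foldl_cons, ih, List.filter_filter, List.all_cons]
      congr 1
      funext f
      exact Bool.and_comm _ _


-- ===== VERDICT (by name: the statement is the Claim_ definition above) =====
theorem find_matching_fields_spec : Claim_equal_find_matching_fields := by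
  intro attribute_values fields_dict valid_fields _ _
  unfold Spec_find_matching_fields find_matching_fields find_matching_fields_alt
  rw [PySem.List.foldl_append_if_eq_filter, foldl_filter_eq_filter_all]
  simp [field_matches_values, in_range]
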